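-- pv_equiv track=rewrite | github.com/joaovmoura/LP1-2019.2-TST | TST/Matriz/cx_alta.py | caixa_alta
-- ===== SOURCE A (Python) =====
-- def caixa_alta(frase):
-- 	caracteres = ''
-- 	frase = ' ' + frase + ' '
--
-- 	for i in range(1 , len(frase) - 1):
--
-- 		if frase[i - 1] == ' ' and frase[i + 1] == ' ':
-- 			caracteres += frase[i].lower()
--
-- 		elif frase[i - 1] == ' ' and frase[i + 1] != ' ':
-- 			caracteres += frase[i].upper()
--
-- 		elif frase[i - 1] != ' ' or frase[i + 1] == ' ':
--
-- 			caracteres += frase[i]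
--
-- 	return caracteres
-- ===== SOURCE B (Python) =====
-- def caixa_alta(frase):
-- 	def transforma(p):
-- 		if len(p) == 1:
-- 			return p.lower()
-- 		if p:
-- 			return p[:1].upper() + p[1:]
-- 		return ''
-- 	return ' '.join(transforma(p) for p in frase.split(' '))
-- ===== Notes on version B (the rewrite author's own statement) =====
-- stated objective: idiomatic
-- what changed: Replaced the index-based scan over a space-padded copy of the string (which inspects both neighbor characters at every position) by tokenizing on single spaces and mapping each token: empty tokens are kept, one-character tokens are lowercased, longer tokens get their first character uppercased; the tokens are then rejoined with the single-space separator.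
import Mathlib
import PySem

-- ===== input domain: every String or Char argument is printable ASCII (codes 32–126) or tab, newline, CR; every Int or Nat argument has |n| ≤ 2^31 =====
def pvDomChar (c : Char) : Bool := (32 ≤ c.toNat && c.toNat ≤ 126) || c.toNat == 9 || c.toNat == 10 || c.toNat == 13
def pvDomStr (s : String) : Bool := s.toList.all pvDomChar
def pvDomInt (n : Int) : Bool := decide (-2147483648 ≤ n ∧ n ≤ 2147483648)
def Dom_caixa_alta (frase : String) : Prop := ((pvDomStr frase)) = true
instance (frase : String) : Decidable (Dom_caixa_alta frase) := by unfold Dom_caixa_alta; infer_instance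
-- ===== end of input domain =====

-- B tokenizes with split(' ') and maps each token instead of A's neighbor-indexed scan
-- of a space-padded string; objective: more idiomatic, same O(n) cost.

-- ===== PORT A =====
-- literal transliteration of A: pad with spaces, scan indices 1..len-2, branch on both neighbors
def caixa_alta (frase : String) : String :=
  let f : List Char := ' ' :: (frase.toList ++ [' '])
  let caracteres : List Char :=
    (PySem.List.pyRange 1 ((f.length : Int) - 1)).foldl
      (fun acc i =>
        acc ++
          (if PySem.List.pyGetD f (i - 1) ' ' = ' ' ∧ PySem.List.pyGetD f (i + 1) ' ' = ' ' then
            PySem.Chars.lower [PySem.List.pyGetD f i ' ']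
          else if PySem.List.pyGetD f (i - 1) ' ' = ' ' ∧ PySem.List.pyGetD f (i + 1) ' ' ≠ ' ' then
            PySem.Chars.upper [PySem.List.pyGetD f i ' ']
          else if PySem.List.pyGetD f (i - 1) ' ' ≠ ' ' ∨ PySem.List.pyGetD f (i + 1) ' ' = ' ' then
            [PySem.List.pyGetD f i ' ']
          else [])) []
  String.mk caracteres

-- ===== PORT B =====
-- helper of B: transforma(p)
def transforma (p : List Char) : List Char :=
  if p.length = 1 then PySem.Chars.lower p
  else if p ≠ [] then
    PySem.Chars.upper (PySem.List.slice p none (some 1)) ++ PySem.List.slice p (some 1) none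
  else []

-- literal transliteration of B: split on ' ', map transforma, join with ' '
def caixa_alta_alt (frase : String) : String :=
  let palavras := PySem.Chars.splitOn frase.toList [' ']
  String.mk (PySem.Chars.join [' '] (palavras.map transforma))

-- ===== PRECONDITION & SPEC =====
def Spec_caixa_alta (frase : String) (out : String) : Prop := out = caixa_alta_alt frase
instance (frase : String) (out : String) : Decidable (Spec_caixa_alta frase out) := by unfold Spec_caixa_alta; infer_instance

-- ===== CLAIM (what is proved, stated in full; the proofs are below) =====
def Claim_equal_caixa_alta : Prop := ∀ (frase : String), Dom_caixa_alta frase → Spec_caixa_alta frase (caixa_alta frase)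

-- ===== LEMMAS AND PROOFS =====

-- A's per-character action, as a function of (previous char, char, next char)
def stepA (prev c next : Char) : List Char :=
  if prev = ' ' ∧ next = ' ' then PySem.Chars.lower [c]
  else if prev = ' ' ∧ next ≠ ' ' then PySem.Chars.upper [c]
  else if prev ≠ ' ' ∨ next = ' ' then [c]
  else []

-- structural form of A's scan: carry the previous character, peek at the next
def goA (prev : Char) : List Char → List Char
  | [] => []
  | c :: rest => stepA prev c (rest.headD ' ') ++ goA c rest

-- structural form of split(' ')
def mySplit : List Char → List (List Char)
  | [] => [[]]
  | c :: rest =>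
    if c = ' ' then [] :: mySplit rest
    else
      match mySplit rest with
      | [] => [[c]]
      | t :: ts => (c :: t) :: ts

def consHead (p : List Char) : List (List Char) → List (List Char)
  | [] => [p]
  | t :: ts => (p ++ t) :: ts

-- the joined tail: separator then transformed token, for each remaining token
def Jtail (ts : List (List Char)) : List Char := ts.flatMap (fun t => ' ' :: transforma t)

lemma mySplit_ne_nil (cs : List Char) : mySplit cs ≠ [] := by
  cases cs with
  | nil => simp [mySplit]
  | cons c rest =>
    simp only [mySplit]
    split_ifs
    · simp
    · cases h : mySplit rest <;> simp

lemma go_spec : ∀ (fuel : Nat) (l cur : List Char) (acc : List (List Char)), l.length < fuel →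
    PySem.Chars.splitOn.go [' '] fuel l cur acc = acc.reverse ++ consHead cur.reverse (mySplit l) := by
  intro fuel
  induction fuel with
  | zero => intro l cur acc h; omega
  | succ fuel ih =>
    intro l cur acc h
    cases l with
    | nil => simp [PySem.Chars.splitOn.go, mySplit, consHead]
    | cons c rest =>
      by_cases hc : c = ' '
      · subst hc
        rw [show PySem.Chars.splitOn.go [' '] (fuel+1) (' ' :: rest) cur acc
              = PySem.Chars.splitOn.go [' '] fuel rest [] (cur.reverse :: acc) by
            simp [PySem.Chars.splitOn.go, List.isPrefixOf]]
        rw [ih rest [] (cur.reverse :: acc) (by simpa using Nat.lt_of_succ_lt_succ h)]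
        have hne := mySplit_ne_nil rest
        cases hms : mySplit rest with
        | nil => exact absurd hms hne
        | cons t ts => simp [mySplit, consHead, hms]
      · rw [show PySem.Chars.splitOn.go [' '] (fuel+1) (c :: rest) cur acc
              = PySem.Chars.splitOn.go [' '] fuel rest (c :: cur) acc by
            simp [PySem.Chars.splitOn.go, List.isPrefixOf]
            intro h
            exact absurd h.symm hc]
        rw [ih rest (c :: cur) acc (by simpa using Nat.lt_of_succ_lt_succ h)]
        have hne := mySplit_ne_nil rest
        cases hms : mySplit rest with
        | nil => exact absurd hms hne
        | cons t ts => simp [mySplit, consHead, hms, hc]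

lemma splitOn_eq_mySplit (cs : List Char) : PySem.Chars.splitOn cs [' '] = mySplit cs := by
  unfold PySem.Chars.splitOn
  rw [go_spec (cs.length + 1) cs [] [] (by omega)]
  have hne := mySplit_ne_nil cs
  cases hms : mySplit cs with
  | nil => exact absurd hms hne
  | cons t ts => simp [consHead]

lemma join_map_cons (h : List Char) (ts : List (List Char)) :
    PySem.Chars.join [' '] ((h :: ts).map transforma) = transforma h ++ Jtail ts := by
  induction ts generalizing h with
  | nil => simp [PySem.Chars.join_singleton, Jtail]
  | cons t ts ih =>
    simp only [List.map_cons] at ih ⊢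
    rw [PySem.Chars.join_cons_cons, ih t]
    simp [Jtail]

lemma stepA_of_ne (prev c next : Char) (hp : prev ≠ ' ') : stepA prev c next = [c] := by
  simp [stepA, hp]

lemma stepA_sp_sp (c : Char) : stepA ' ' c ' ' = PySem.Chars.lower [c] := by
  simp [stepA]

lemma stepA_sp_ne (c d : Char) (h : d ≠ ' ') : stepA ' ' c d = PySem.Chars.upper [c] := by
  simp [stepA, h]

-- head of mySplit is empty iff the string is empty or starts with a space
lemma mySplit_head :
    ∀ (cs : List Char), ∃ t ts, mySplit cs = t :: ts ∧ (t = [] ↔ cs.headD ' ' = ' ') := by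
  intro cs
  cases cs with
  | nil => exact ⟨[], [], by simp [mySplit]⟩
  | cons c rest =>
    by_cases hc : c = ' '
    · exact ⟨[], mySplit rest, by simp [mySplit, hc]⟩
    · cases hms : mySplit rest with
      | nil => exact absurd hms (mySplit_ne_nil rest)
      | cons t ts => exact ⟨c :: t, ts, by simp [mySplit, hc, hms]⟩

-- the joint induction: A's scan equals B's tokenized form, in both scan states
lemma main_ind : ∀ (cs : List Char),
    goA ' ' cs = PySem.Chars.join [' '] ((mySplit cs).map transforma) ∧
    (∀ prev, prev ≠ ' ' → goA prev cs = (mySplit cs).headD [] ++ Jtail (mySplit cs).tail) := by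
  intro cs
  induction cs with
  | nil =>
    constructor
    · simp [goA, mySplit, PySem.Chars.join_singleton, transforma]
    · intro prev _; simp [goA, mySplit, Jtail]
  | cons c rest ih =>
    obtain ⟨ihA, ihB⟩ := ih
    by_cases hc : c = ' '
    · subst hc
      constructor
      · obtain ⟨t, ts, hms, hts⟩ := mySplit_head rest
        rw [show mySplit (' ' :: rest) = [] :: mySplit rest by simp [mySplit]]
        rw [join_map_cons, show transforma [] = [] by simp [transforma]]
        rw [hms, join_map_cons] at ihA
        have hstep : stepA ' ' ' ' (rest.headD ' ') = [' '] := by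
          by_cases hn : rest.headD ' ' = ' '
          · rw [hn, stepA_sp_sp]; decide
          · rw [stepA_sp_ne _ _ hn]; decide
        show stepA ' ' ' ' (rest.headD ' ') ++ goA ' ' rest = [] ++ Jtail (mySplit rest)
        rw [hstep, ihA, hms]
        simp [Jtail]
      · intro prev hp
        rw [show mySplit (' ' :: rest) = [] :: mySplit rest by simp [mySplit]]
        simp only [goA, stepA_of_ne _ _ _ hp, List.headD_cons, List.tail_cons, List.nil_append]
        obtain ⟨t, ts, hms, hts⟩ := mySplit_head rest
        rw [ihA, hms, join_map_cons]
        simp [Jtail]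
    · obtain ⟨t, ts, hms, hts⟩ := mySplit_head rest
      have hsplit : mySplit (c :: rest) = (c :: t) :: ts := by
        simp [mySplit, hc, hms]
      constructor
      · rw [hsplit, join_map_cons]
        simp only [goA]
        rw [ihB c hc, hms]
        by_cases hn : rest.headD ' ' = ' '
        · have ht : t = [] := hts.mpr hn
          subst ht
          rw [show stepA ' ' c (rest.headD ' ') = PySem.Chars.lower [c] by rw [hn, stepA_sp_sp]]
          rw [show transforma [c] = PySem.Chars.lower [c] by simp [transforma]]
          simp
        · have ht : t ≠ [] := fun h => hn (hts.mp h)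
          rw [show stepA ' ' c (rest.headD ' ') = PySem.Chars.upper [c] by rw [stepA_sp_ne _ _ hn]]
          rw [show transforma (c :: t) = PySem.Chars.upper [c] ++ t by
            simp [transforma, PySem.List.slice_to, PySem.List.slice_from]
            cases t with
            | nil => exact absurd rfl ht
            | cons x xs => simp]
          simp
      · intro prev hp
        rw [hsplit]
        simp only [goA, stepA_of_ne _ _ _ hp, List.headD_cons, List.tail_cons]
        rw [ihB c hc, hms]
        simp

-- A's indexed loop, as a flatMap of stepA over the padded list, equals goA
lemma loopA : ∀ (todo done : List Char) (prev : Char),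
    (PySem.List.pyRange ((done.length + 1 : Nat) : Int) ((done.length + 1 + todo.length : Nat) : Int)).flatMap
      (fun i => stepA (PySem.List.pyGetD (done ++ prev :: (todo ++ [' '])) (i - 1) ' ')
                      (PySem.List.pyGetD (done ++ prev :: (todo ++ [' '])) i ' ')
                      (PySem.List.pyGetD (done ++ prev :: (todo ++ [' '])) (i + 1) ' ')) = goA prev todo := by
  intro todo
  induction todo with
  | nil =>
    intro done prev
    rw [show ((done.length + 1 + ([] : List Char).length : Nat) : Int) = ((done.length + 1 : Nat) : Int) by simp]
    rw [show PySem.List.pyRange ((done.length + 1 : Nat) : Int) ((done.length + 1 : Nat) : Int) = [] by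
      simp [PySem.List.pyRange]]
    simp [goA]
  | cons c rest ih =>
    intro done prev
    have hab : ((done.length + 1 : Nat) : Int) < ((done.length + 1 + (c :: rest).length : Nat) : Int) := by
      simp only [List.length_cons]; push_cast; omega
    rw [PySem.List.pyRange_one_cons hab]
    simp only [List.flatMap_cons]
    have h1 : PySem.List.pyGetD (done ++ prev :: (c :: rest ++ [' '])) (((done.length + 1 : Nat) : Int) - 1) ' ' = prev := by
      rw [show (((done.length + 1 : Nat) : Int) - 1) = ((done.length : Nat) : Int) by push_cast; ring]
      rw [PySem.List.pyGetD_natCast]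
      simp [List.getD_eq_getElem?_getD]
    have h2 : PySem.List.pyGetD (done ++ prev :: (c :: rest ++ [' '])) ((done.length + 1 : Nat) : Int) ' ' = c := by
      rw [PySem.List.pyGetD_natCast]
      simp [List.getD_eq_getElem?_getD]
    have h3 : PySem.List.pyGetD (done ++ prev :: (c :: rest ++ [' '])) (((done.length + 1 : Nat) : Int) + 1) ' ' = rest.headD ' ' := by
      rw [show (((done.length + 1 : Nat) : Int) + 1) = ((done.length + 2 : Nat) : Int) by push_cast; ring]
      rw [PySem.List.pyGetD_natCast]
      cases rest <;> simp [List.getD_eq_getElem?_getD]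
    simp only [List.cons_append] at h1 h2 h3 ⊢
    rw [h1, h2, h3]
    rw [show goA prev (c :: rest) = stepA prev c (rest.headD ' ') ++ goA c rest from rfl]
    congr 1
    have := ih (done ++ [prev]) c
    have e1 : ((done.length + 1 : Nat) : Int) + 1 = (((done ++ [prev]).length + 1 : Nat) : Int) := by
      simp only [List.length_append, List.length_cons, List.length_nil]; push_cast; ring
    have e2 : ((done.length + 1 + (c :: rest).length : Nat) : Int) = (((done ++ [prev]).length + 1 + rest.length : Nat) : Int) := by
      simp only [List.length_append, List.length_cons, List.length_nil]; push_cast; ring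
    have e3 : done ++ prev :: c :: (rest ++ [' ']) = (done ++ [prev]) ++ c :: (rest ++ [' ']) := by simp
    rw [e1, e2]
    simp only [e3]
    exact this

lemma caixa_alta_eq_goA (frase : String) :
    caixa_alta frase = String.mk (goA ' ' frase.toList) := by
  simp only [caixa_alta]
  apply congrArg
  rw [PySem.List.foldl_append_eq_flatMap, List.nil_append]
  have h := loopA frase.toList [] ' '
  simp only [List.length_nil, List.nil_append] at h
  rw [show (((' ' :: (frase.toList ++ [' '])).length : Int) - 1) = ((0 + 1 + frase.toList.length : Nat) : Int) by
    simp only [List.length_cons, List.length_append, List.length_nil]; push_cast; ring]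
  rw [show (1 : Int) = ((0 + 1 : Nat) : Int) by norm_num]
  rw [← h]
  rfl

-- ===== VERDICT (by name: the statement is the Claim_ definition above) =====
theorem caixa_alta_spec : Claim_equal_caixa_alta := by
  intro frase _
  unfold Spec_caixa_alta
  rw [caixa_alta_eq_goA]
  unfold caixa_alta_alt
  rw [splitOn_eq_mySplit]
  exact congrArg _ (main_ind frase.toList).1
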